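-- pv_equiv track=rewrite | github.com/BobIvans/solana-coin-signal-engine | analytics/wallet_clustering.py | assign_wallet_cluster_ids
-- ===== SOURCE A (Python) =====
-- from collections import defaultdict
--
-- class _UnionFind:
--     def __init__(self, items: list[str]) -> None:
--         self.parent = {item: item for item in items}
--
--     def find(self, item: str) -> str:
--         parent = self.parent[item]
--         if parent != item:
--             self.parent[item] = self.find(parent)
--         return self.parent[item]
--
--     def union(self, left: str, right: str) -> None:
--         left_root = self.find(left)
--         right_root = self.find(right)
--         if left_root == right_root:
--             return
--         if left_root < right_root:
--             self.parent[right_root] = left_root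
--         else:
--             self.parent[left_root] = right_root
--
-- def assign_wallet_cluster_ids(cluster_keys_by_wallet: dict[str, list[str]]) -> dict[str, str]:
--     """Assign stable cluster ids to wallets that share inferred cluster keys."""
--
--     if not cluster_keys_by_wallet:
--         return {}
--
--     union_find = _UnionFind(sorted(cluster_keys_by_wallet))
--     wallets_by_key: dict[str, list[str]] = defaultdict(list)
--     for wallet, keys in sorted(cluster_keys_by_wallet.items()):
--         for key in keys:
--             wallets_by_key[key].append(wallet)
--
--     for wallets in wallets_by_key.values():
--         if len(wallets) < 2:
--             continue
--         anchor = wallets[0]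
--         for wallet in wallets[1:]:
--             union_find.union(anchor, wallet)
--
--     root_to_wallets: dict[str, list[str]] = defaultdict(list)
--     for wallet in sorted(cluster_keys_by_wallet):
--         root_to_wallets[union_find.find(wallet)].append(wallet)
--
--     cluster_id_map: dict[str, str] = {}
--     for index, root in enumerate(sorted(root_to_wallets), start=1):
--         wallets = sorted(root_to_wallets[root])
--         if len(wallets) < 2:
--             continue
--         cluster_id = f"cluster_{index}"
--         for wallet in wallets:
--             cluster_id_map[wallet] = cluster_id
--     return cluster_id_map
-- ===== SOURCE B (Python) =====
-- def assign_wallet_cluster_ids(cluster_keys_by_wallet: dict[str, list[str]]) -> dict[str, str]: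
--     """Assign stable cluster ids to wallets that share inferred cluster keys."""
--     wallets = sorted(cluster_keys_by_wallet)
--     groups: dict[str, list[str]] = {}
--     for w in wallets:
--         for k in cluster_keys_by_wallet[w]:
--             groups.setdefault(k, []).append(w)
--     rep = {w: w for w in wallets}          # wallet -> current representative (min of its class)
--     members = {w: [w] for w in wallets}    # representative -> wallets of its class
--     for group in groups.values():
--         roots = {rep[w] for w in group}
--         target = min(roots)
--         for r in roots:
--             if r != target:
--                 for x in members[r]:
--                     rep[x] = target
--                 members[target].extend(members[r])
--     blocks: dict[str, list[str]] = {}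
--     for w in wallets:
--         blocks.setdefault(rep[w], []).append(w)
--     out: dict[str, str] = {}
--     index = 1
--     for r in sorted(blocks):
--         block = blocks[r]
--         if len(block) >= 2:
--             cid = f"cluster_{index}"
--             for w in block:
--                 out[w] = cid
--         index += 1
--     return out
-- ===== Notes on version B (the rewrite author's own statement) =====
-- stated objective: alternative
-- what changed: Replaces the recursive union-find with path compression by flat wallet->representative and representative->members maps: each key group's classes are merged by relabeling only the members of the non-minimal classes to the minimal root, then wallets are grouped by final representative; no parent forest, no recursion, no find.
import Mathlib
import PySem

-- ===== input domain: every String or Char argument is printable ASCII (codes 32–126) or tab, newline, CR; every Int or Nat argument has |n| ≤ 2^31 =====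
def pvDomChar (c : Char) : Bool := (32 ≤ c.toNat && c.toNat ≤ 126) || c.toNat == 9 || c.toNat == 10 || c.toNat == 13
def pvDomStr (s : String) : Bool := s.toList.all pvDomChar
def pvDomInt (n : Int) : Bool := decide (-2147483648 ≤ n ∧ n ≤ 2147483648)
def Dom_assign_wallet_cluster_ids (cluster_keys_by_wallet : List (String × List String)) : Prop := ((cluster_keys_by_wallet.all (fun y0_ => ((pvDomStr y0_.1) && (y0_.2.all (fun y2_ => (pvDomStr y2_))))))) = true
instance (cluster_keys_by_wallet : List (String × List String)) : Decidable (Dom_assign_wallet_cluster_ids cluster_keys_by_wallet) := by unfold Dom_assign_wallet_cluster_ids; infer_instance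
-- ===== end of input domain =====

-- B replaces A's recursive union-find (path compression) by a flat representative map that
-- relabels each key group's classes to their minimal root in one pass; same return value (alternative).

-- ===== PORT A =====
-- _UnionFind.find: recursive, with path compression.  `fuel` is only a termination guard:
-- parent chains strictly decrease inside the finite key set, so with fuel > number of wallets
-- the 0-case is never reached.  `parent.getD item item` ports `self.parent[item]` (item is always a key).
def ufFind (fuel : Nat) (parent : PySem.Dict String String) (item : String) :
    PySem.Dict String String × String :=
  match fuel with
  | 0 => (parent, item)
  | fuel + 1 =>
    let p := parent.getD item item
    if p ≠ item then
      let r := ufFind fuel parent p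
      let parent2 := r.1.insert item r.2
      (parent2, parent2.getD item item)
    else (parent, p)

-- _UnionFind.union
def ufUnion (fuel : Nat) (parent : PySem.Dict String String) (left right : String) :
    PySem.Dict String String :=
  let f1 := ufFind fuel parent left
  let f2 := ufFind fuel f1.1 right
  if f1.2 = f2.2 then f2.1
  else if f1.2 < f2.2 then f2.1.insert f2.2 f1.2
  else f2.1.insert f1.2 f2.2

-- wallets_by_key built from sorted(cluster_keys_by_wallet.items()); keys are distinct, so Python's
-- tuple comparison is decided by the wallet component alone (the second component is never compared).
def aGroups (d : PySem.Dict String (List String)) : PySem.Dict String (List String) :=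
  (PySem.List.sorted d.items (fun p => p.1) false).foldl
    (fun g p => p.2.foldl (fun g k => g.modify k [] (fun ws => ws ++ [p.1])) g)
    PySem.Dict.empty

-- the union loop over wallets_by_key.values()
def aUnionLoop (fuel : Nat) (gl : List (List String)) (parent : PySem.Dict String String) :
    PySem.Dict String String :=
  gl.foldl
    (fun pd ws =>
      if ws.length < 2 then pd
      else
        match ws with
        | [] => pd  -- unreachable: length ≥ 2
        | anchor :: rest => rest.foldl (fun pd w => ufUnion fuel pd anchor w) pd)
    parent

-- root_to_wallets loop (find mutates parent, so the parent dict is threaded through)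
def aRootLoop (fuel : Nat) (wallets : List String) (parent : PySem.Dict String String) :
    PySem.Dict String String × PySem.Dict String (List String) :=
  wallets.foldl
    (fun st w =>
      let f := ufFind fuel st.1 w
      (f.1, st.2.modify f.2 [] (fun ws => ws ++ [w])))
    (parent, PySem.Dict.empty)

-- final loop: enumerate(sorted(root_to_wallets), start=1)
def aFinal (rtw : PySem.Dict String (List String)) : PySem.Dict String String :=
  ((PySem.List.sorted rtw.keys (fun r => r) false).foldl
    (fun (st : PySem.Dict String String × Int) root =>
      let ws := PySem.List.sorted (rtw.getD root []) (fun w => w) false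
      if ws.length < 2 then (st.1, st.2 + 1)
      else (ws.foldl (fun cm w => cm.insert w ("cluster_" ++ PySem.Int.toStr st.2)) st.1, st.2 + 1))
    (PySem.Dict.empty, 1)).1

def assign_wallet_cluster_ids (cluster_keys_by_wallet : List (String × List String)) :
    List (String × String) :=
  if cluster_keys_by_wallet.isEmpty then []
  else
    let d := PySem.Dict.ofList cluster_keys_by_wallet
    let wallets := PySem.List.sorted d.keys (fun w => w) false
    let fuel := wallets.length + 1
    let parent0 := wallets.foldl (fun pd w => pd.insert w w) PySem.Dict.empty
    let wallets_by_key := aGroups d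
    let parent1 := aUnionLoop fuel wallets_by_key.values parent0
    let root_to_wallets := (aRootLoop fuel wallets parent1).2
    (aFinal root_to_wallets).items

-- ===== PORT B =====
-- key -> wallets that list it (d.getD w [] ports cluster_keys_by_wallet[w]; w is always a key)
def bGroups (d : PySem.Dict String (List String)) (wallets : List String) :
    PySem.Dict String (List String) :=
  wallets.foldl
    (fun g w => (d.getD w []).foldl (fun g k => g.modify k [] (fun ws => ws ++ [w])) g)
    PySem.Dict.empty

-- one key group: collect the classes' roots, then relabel only the wallets of the non-minimal
-- classes to the minimal root, concatenating their member lists onto the minimal root's list.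
-- (The Python iterates the set `roots`; the result is iteration-order insensitive: rep updates
-- of distinct classes are disjoint and member lists are only used via sorting / key sets.)
def bMerge (st : PySem.Dict String String × PySem.Dict String (List String))
    (group : List String) :
    PySem.Dict String String × PySem.Dict String (List String) :=
  let roots : PySem.Set String := PySem.Set.ofList (group.map (fun w => st.1.getD w w))
  let target := (PySem.List.min? roots (fun r => r)).getD ""
  roots.foldl
    (fun st r =>
      if r ≠ target then
        (((st.2.getD r []).foldl (fun rp x => rp.insert x target) st.1),
         st.2.insert target (st.2.getD target [] ++ st.2.getD r []))
      else st)
    st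

-- group wallets by final representative (wallets is sorted, so each block is sorted)
def bBlocks (wallets : List String) (rep : PySem.Dict String String) :
    PySem.Dict String (List String) :=
  wallets.foldl (fun b w => b.modify (rep.getD w w) [] (fun ws => ws ++ [w])) PySem.Dict.empty

def bFinal (blocks : PySem.Dict String (List String)) : PySem.Dict String String :=
  ((PySem.List.sorted blocks.keys (fun r => r) false).foldl
    (fun (st : PySem.Dict String String × Int) r =>
      let block := blocks.getD r []
      if block.length < 2 then (st.1, st.2 + 1)
      else (block.foldl (fun out w => out.insert w ("cluster_" ++ PySem.Int.toStr st.2)) st.1, st.2 + 1))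
    (PySem.Dict.empty, 1)).1

def assign_wallet_cluster_ids_alt (cluster_keys_by_wallet : List (String × List String)) :
    List (String × String) :=
  let d := PySem.Dict.ofList cluster_keys_by_wallet
  let wallets := PySem.List.sorted d.keys (fun w => w) false
  let groups := bGroups d wallets
  let rep0 := wallets.foldl (fun r w => r.insert w w) PySem.Dict.empty
  let members0 := wallets.foldl (fun m w => m.insert w [w]) PySem.Dict.empty
  let st := groups.values.foldl bMerge (rep0, members0)
  (bFinal (bBlocks wallets st.1)).items

-- ===== PRECONDITION & SPEC =====
def Spec_assign_wallet_cluster_ids (cluster_keys_by_wallet : List (String × List String)) (out : List (String × String)) : Prop := out = assign_wallet_cluster_ids_alt cluster_keys_by_wallet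
instance (cluster_keys_by_wallet : List (String × List String)) (out : List (String × String)) : Decidable (Spec_assign_wallet_cluster_ids cluster_keys_by_wallet out) := by unfold Spec_assign_wallet_cluster_ids; infer_instance

-- ===== CLAIM (what is proved, stated in full; the proofs are below) =====
def Claim_equal_assign_wallet_cluster_ids : Prop := ∀ (cluster_keys_by_wallet : List (String × List String)), Dom_assign_wallet_cluster_ids cluster_keys_by_wallet → Spec_assign_wallet_cluster_ids cluster_keys_by_wallet (assign_wallet_cluster_ids cluster_keys_by_wallet)

-- ===== LEMMAS AND PROOFS =====

-- the abstract "partition" both sides compute: a representative function String → String.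
-- Mof rs = min(rs) for a nonempty list
def Mof (rs : List String) : String :=
  match rs with
  | [] => ""
  | x :: t => t.foldl min x

-- merging all classes that meet group g into the minimal root among them
def mergeG (ρ : String → String) (g : List String) : String → String :=
  fun w => if ρ w ∈ g.map ρ then Mof (g.map ρ) else ρ w

def GoodRho (W : List String) (ρ : String → String) : Prop :=
  ∀ w ∈ W, ρ w ∈ W ∧ ρ w ≤ w ∧ ρ (ρ w) = ρ w

def UFInv (W : List String) (ρ : String → String) (parent : PySem.Dict String String) : Prop :=
  ∀ w ∈ W, parent.getD w w ∈ W ∧ parent.getD w w ≤ w ∧ ρ (parent.getD w w) = ρ w ∧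
    (parent.getD w w = w ↔ ρ w = w)

lemma Mof_mem (rs : List String) (h : rs ≠ []) : Mof rs ∈ rs := by
  cases rs with
  | nil => exact absurd rfl h
  | cons x t =>
    rcases PySem.List.foldl_min_mem t x with h1 | h1
    · simp [Mof, h1]
    · simp [Mof]; right; exact h1

lemma Mof_le (rs : List String) (x : String) (hx : x ∈ rs) : Mof rs ≤ x := by
  cases rs with
  | nil => simp at hx
  | cons y t =>
    rcases List.mem_cons.mp hx with rfl | hxt
    · exact (PySem.List.foldl_min_le t x).1
    · exact (PySem.List.foldl_min_le t y).2 x hxt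

lemma Mof_congr (rs rs' : List String) (h : ∀ x, x ∈ rs ↔ x ∈ rs') (hne : rs ≠ []) :
    Mof rs = Mof rs' := by
  have hm : Mof rs ∈ rs' := (h _).mp (Mof_mem rs hne)
  have hne' : rs' ≠ [] := List.ne_nil_of_mem hm
  exact le_antisymm (Mof_le rs _ ((h _).mpr (Mof_mem rs' hne'))) (Mof_le rs' _ hm)

lemma Mof_pair (x y : String) : Mof [x, y] = min x y := rfl

lemma mergeG_singleton (ρ : String → String) (w : String) : mergeG ρ [w] = ρ := by
  funext x
  simp only [mergeG, List.map_cons, List.map_nil, List.mem_cons, List.not_mem_nil, or_false, Mof,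
    List.foldl_nil]
  split_ifs with h
  · exact h.symm
  · rfl

lemma Mof_map_mem (ρ : String → String) (g : List String) (hne : g ≠ []) :
    ∃ x ∈ g, Mof (g.map ρ) = ρ x := by
  have h := Mof_mem (g.map ρ) (by simpa using hne)
  rcases List.mem_map.mp h with ⟨x, hx, hx2⟩
  exact ⟨x, hx, hx2.symm⟩

lemma GoodRho_mergeG (W : List String) (ρ : String → String) (g : List String)
    (hG : GoodRho W ρ) (hsub : ∀ x ∈ g, x ∈ W) (hne : g ≠ []) :
    GoodRho W (mergeG ρ g) := by
  rcases Mof_map_mem ρ g hne with ⟨x, hxg, hM⟩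
  have hMW : Mof (g.map ρ) ∈ W := hM ▸ (hG x (hsub x hxg)).1
  have hMfix : ρ (Mof (g.map ρ)) = Mof (g.map ρ) := by
    rw [hM, (hG x (hsub x hxg)).2.2]
  have hMmem : Mof (g.map ρ) ∈ g.map ρ := Mof_mem _ (by simpa using hne)
  intro w hw
  by_cases hc : ρ w ∈ g.map ρ
  · refine ⟨by simp [mergeG, hc, hMW], ?_, ?_⟩
    · simp only [mergeG, hc, if_true]
      exact le_trans (Mof_le _ _ hc) (hG w hw).2.1
    · simp only [mergeG, hc, hMfix, hMmem, if_pos]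
  · refine ⟨by simp [mergeG, hc]; exact (hG w hw).1, ?_, ?_⟩
    · simp only [mergeG, hc, if_false]
      exact (hG w hw).2.1
    · have hr : ρ (ρ w) = ρ w := (hG w hw).2.2
      simp only [mergeG, hc, if_false, hr]

lemma mergeG_append (ρ : String → String) (a b : String) (t : List String) :
    mergeG (mergeG ρ (a :: t)) [a, b] = mergeG ρ (a :: (t ++ [b])) := by
  funext w
  set rs := (a :: t).map ρ with hrs
  set M := Mof rs with hMdef
  have hMmem : M ∈ rs := Mof_mem rs (by simp [hrs])
  have hmap : (a :: (t ++ [b])).map ρ = rs ++ [ρ b] := by simp [hrs]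
  have hMof : Mof (rs ++ [ρ b]) = min M (ρ b) := by
    rw [hrs]; simp only [List.map_cons]
    show Mof (ρ a :: (t.map ρ ++ [ρ b])) = _
    simp only [Mof, List.foldl_append, List.foldl_cons, List.foldl_nil]
    rfl
  have ha' : ρ a ∈ rs := by simp [hrs]
  simp only [mergeG, hmap, ← hrs, ← hMdef, List.mem_cons, List.not_mem_nil, or_false,
    List.mem_append, List.map_cons, List.map_nil, hMof, if_pos ha', Mof_pair]
  by_cases hb : ρ b ∈ rs
  · have hminM : min M (ρ b) = M := min_eq_left (Mof_le rs _ hb)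
    by_cases hw : ρ w ∈ rs
    · simp [hb, hw, hminM]
    · have hwb : ¬ ρ w = ρ b := fun h => hw (h ▸ hb)
      have h3 : ¬ ρ w = M := fun h => hw (h ▸ hMmem)
      simp [hb, hw, hwb, h3]
  · have hMne : ¬ M = ρ b := fun h => hb (h ▸ hMmem)
    by_cases hw : ρ w ∈ rs
    · simp [hb, hw]
    · have h3 : ¬ ρ w = M := fun h => hw (h ▸ hMmem)
      by_cases hwb : ρ w = ρ b
      · simp [hb, hwb]
      · simp [hb, hw, hwb, h3]

lemma getD_foldl_insert_fun {ν : Type} (l : List String) (f : String → ν)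
    (d : PySem.Dict String ν) (k : String) (dflt : ν) :
    (l.foldl (fun d x => d.insert x (f x)) d).getD k dflt
      = if k ∈ l then f k else d.getD k dflt := by
  induction l generalizing d with
  | nil => simp
  | cons x t ih =>
    simp only [List.foldl_cons, ih, PySem.Dict.getD_insert, List.mem_cons]
    by_cases hkt : k ∈ t
    · simp [hkt]
    · by_cases hkx : k = x
      · subst hkx; simp [hkt]
      · simp [hkt, hkx]

lemma ufFind_spec (W : List String) (ρ : String → String) (hG : GoodRho W ρ) :
    ∀ (fuel : Nat) (parent : PySem.Dict String String) (w : String),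
      UFInv W ρ parent → w ∈ W → (W.filter (fun x => decide (x < w))).length < fuel →
      (ufFind fuel parent w).2 = ρ w ∧ UFInv W ρ (ufFind fuel parent w).1 := by
  intro fuel
  induction fuel with
  | zero => intro parent w _ _ hf; omega
  | succ f ih =>
    intro parent w hI hw hf
    obtain ⟨hpW, hple, hprho, hpiff⟩ := hI w hw
    by_cases hpw : parent.getD w w = w
    · have : ufFind (f + 1) parent w = (parent, parent.getD w w) := by
        simp [ufFind, hpw]
      rw [this]
      refine ⟨?_, hI⟩
      rw [hpw]
      exact (hpiff.mp hpw).symm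
    · have hplt : parent.getD w w < w := lt_of_le_of_ne hple hpw
      have hfp : (W.filter (fun x => decide (x < parent.getD w w))).length < f := by
        have hsub : W.filter (fun x => decide (x < parent.getD w w))
            = (W.filter (fun x => decide (x < w))).filter (fun x => decide (x < parent.getD w w)) := by
          rw [List.filter_filter]
          apply List.filter_congr
          intro x _
          by_cases hx : x < parent.getD w w
          · simp [hx, lt_trans hx hplt]
          · simp [hx]
        have hlt : ((W.filter (fun x => decide (x < w))).filter
            (fun x => decide (x < parent.getD w w))).length
            < (W.filter (fun x => decide (x < w))).length := by
          apply List.length_filter_lt_length_iff_exists.mpr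
          exact ⟨parent.getD w w, List.mem_filter.mpr ⟨hpW, decide_eq_true hplt⟩,
            by simp⟩
        rw [hsub]
        omega
      obtain ⟨hv, hI1⟩ := ih parent (parent.getD w w) hI hpW hfp
      have hstep : ufFind (f + 1) parent w
          = ((ufFind f parent (parent.getD w w)).1.insert w (ufFind f parent (parent.getD w w)).2,
             ((ufFind f parent (parent.getD w w)).1.insert w
               (ufFind f parent (parent.getD w w)).2).getD w w) := by
        simp [ufFind, hpw]
      rw [hstep]
      rw [hv]
      have hroot : ρ (parent.getD w w) = ρ w := hprho
      rw [hroot]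
      constructor
      · simp [PySem.Dict.getD_insert_self]
      · intro x hx
        by_cases hxw : x = w
        · subst hxw
          obtain ⟨h1, h2, h3⟩ := hG x hx
          refine ⟨by simpa using h1, by simpa using h2, by simpa using h3, by simp⟩
        · obtain ⟨h1, h2, h3, h4⟩ := hI1 x hx
          rw [PySem.Dict.getD_insert_of_ne _ _ _ hxw]
          exact ⟨h1, h2, h3, h4⟩

lemma insert_root_inv (W : List String) (ρ : String → String)
    (d : PySem.Dict String String) (S L : String)
    (hI : UFInv W ρ d) (hSW : S ∈ W) (hS : ρ S = S) (hL : ρ L = L) (hSL : S < L) :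
    UFInv W (fun w => if ρ w = S ∨ ρ w = L then S else ρ w) (d.insert L S) := by
  intro w hw
  by_cases hwL : w = L
  · rw [hwL, PySem.Dict.getD_insert_self]
    refine ⟨hSW, le_of_lt hSL, ?_, ?_⟩
    · show (if ρ S = S ∨ ρ S = L then S else ρ S) = (if ρ L = S ∨ ρ L = L then S else ρ L)
      rw [if_pos (Or.inl hS), if_pos (Or.inr hL)]
    · show S = L ↔ (if ρ L = S ∨ ρ L = L then S else ρ L) = L
      rw [if_pos (Or.inr hL)]
  · rw [PySem.Dict.getD_insert_of_ne _ _ _ hwL]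
    obtain ⟨q1, q2, q3, q4⟩ := hI w hw
    refine ⟨q1, q2, ?_, ?_⟩
    · show (if ρ (d.getD w w) = S ∨ ρ (d.getD w w) = L then S else ρ (d.getD w w))
        = (if ρ w = S ∨ ρ w = L then S else ρ w)
      rw [q3]
    · show d.getD w w = w ↔ (if ρ w = S ∨ ρ w = L then S else ρ w) = w
      constructor
      · intro hp
        have hww : ρ w = w := q4.mp hp
        by_cases hc : ρ w = S ∨ ρ w = L
        · rcases hc with hc | hc
          · rw [if_pos (Or.inl hc), ← hc, hww]
          · exact absurd (hww ▸ hc) hwL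
        · rw [if_neg hc]; exact hww
      · intro h'
        apply q4.mpr
        by_cases hc : ρ w = S ∨ ρ w = L
        · rw [if_pos hc] at h'
          rw [← h']; exact hS
        · rw [if_neg hc] at h'; exact h'

lemma ufUnion_spec (W : List String) (ρ : String → String) (fuel : Nat)
    (parent : PySem.Dict String String) (a b : String)
    (hG : GoodRho W ρ) (hI : UFInv W ρ parent) (ha : a ∈ W) (hb : b ∈ W)
    (hfuel : W.length < fuel) :
    UFInv W (mergeG ρ [a, b]) (ufUnion fuel parent a b) := by
  have hbound : ∀ x : String, (W.filter (fun y => decide (y < x))).length < fuel :=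
    fun x => lt_of_le_of_lt (List.length_filter_le _ _) hfuel
  obtain ⟨hv1, hI1⟩ := ufFind_spec W ρ hG fuel parent a hI ha (hbound a)
  obtain ⟨hv2, hI2⟩ := ufFind_spec W ρ hG fuel (ufFind fuel parent a).1 b hI1 hb (hbound b)
  have hσ : mergeG ρ [a, b] = fun w => if ρ w = ρ a ∨ ρ w = ρ b then min (ρ a) (ρ b) else ρ w := by
    funext w; simp [mergeG, Mof_pair]
  show UFInv W (mergeG ρ [a, b])
    (if (ufFind fuel parent a).2 = (ufFind fuel (ufFind fuel parent a).1 b).2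
     then (ufFind fuel (ufFind fuel parent a).1 b).1
     else if (ufFind fuel parent a).2 < (ufFind fuel (ufFind fuel parent a).1 b).2
     then ((ufFind fuel (ufFind fuel parent a).1 b).1).insert
            (ufFind fuel (ufFind fuel parent a).1 b).2 (ufFind fuel parent a).2
     else ((ufFind fuel (ufFind fuel parent a).1 b).1).insert
            (ufFind fuel parent a).2 (ufFind fuel (ufFind fuel parent a).1 b).2)
  rw [hv1, hv2]
  by_cases heq : ρ a = ρ b
  · rw [if_pos heq]
    have hid : mergeG ρ [a, b] = ρ := by
      rw [hσ]; funext w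
      split_ifs with h
      · rw [← heq, min_self]
        rcases h with h | h
        · exact h.symm
        · rw [heq]; exact h.symm
      · rfl
    rw [hid]; exact hI2
  · by_cases hltc : ρ a < ρ b
    · rw [if_neg heq, if_pos hltc]
      have h1 := insert_root_inv W ρ _ (ρ a) (ρ b) hI2 (hG a ha).1 (hG a ha).2.2
        (hG b hb).2.2 hltc
      have h2 : mergeG ρ [a, b] = fun w => if ρ w = ρ a ∨ ρ w = ρ b then ρ a else ρ w := by
        rw [hσ]; funext w; rw [min_eq_left (le_of_lt hltc)]
      rw [h2]; exact h1
    · have hltb : ρ b < ρ a := lt_of_le_of_ne (not_lt.mp hltc) (fun h => heq h.symm)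
      rw [if_neg heq, if_neg hltc]
      have h1 := insert_root_inv W ρ _ (ρ b) (ρ a) hI2 (hG b hb).1 (hG b hb).2.2
        (hG a ha).2.2 hltb
      have h2 : mergeG ρ [a, b] = fun w => if ρ w = ρ b ∨ ρ w = ρ a then ρ b else ρ w := by
        rw [hσ]; funext w; rw [min_eq_right (le_of_lt hltb)]
        by_cases h : ρ w = ρ a ∨ ρ w = ρ b
        · rw [if_pos h, if_pos (Or.comm.mp h)]
        · rw [if_neg h, if_neg (fun hh => h (Or.comm.mp hh))]
      rw [h2]; exact h1

lemma aRest_spec (W : List String) (ρ : String → String) (fuel : Nat) (anchor : String)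
    (hfuel : W.length < fuel) (hG : GoodRho W ρ) :
    ∀ (rest t : List String) (parent : PySem.Dict String String),
      UFInv W (mergeG ρ (anchor :: t)) parent →
      (∀ x ∈ anchor :: (t ++ rest), x ∈ W) →
      UFInv W (mergeG ρ (anchor :: (t ++ rest)))
        (rest.foldl (fun pd w => ufUnion fuel pd anchor w) parent) := by
  intro rest
  induction rest with
  | nil => intro t parent hInv _; simpa using hInv
  | cons b rest ih =>
    intro t parent hInv hsub
    have hanchor : anchor ∈ W := hsub anchor (List.mem_cons_self)
    have hb : b ∈ W := hsub b (by simp)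
    have hGt : GoodRho W (mergeG ρ (anchor :: t)) := by
      apply GoodRho_mergeG W ρ (anchor :: t) hG _ (by simp)
      intro x hx
      apply hsub
      rcases List.mem_cons.mp hx with rfl | hx
      · exact List.mem_cons_self
      · simp [hx]
    have h1 := ufUnion_spec W (mergeG ρ (anchor :: t)) fuel parent anchor b hGt hInv
      hanchor hb hfuel
    rw [mergeG_append] at h1
    have h2 := ih (t ++ [b]) (ufUnion fuel parent anchor b) h1 (by
      intro x hx
      apply hsub
      rcases List.mem_cons.mp hx with rfl | hx
      · exact List.mem_cons_self
      · simp only [List.append_assoc, List.singleton_append] at hx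
        simp [hx])
    simp only [List.append_assoc, List.singleton_append] at h2
    simpa using h2

lemma aUnionLoop_spec (W : List String) (fuel : Nat) (hfuel : W.length < fuel) :
    ∀ (gl : List (List String)) (ρ : String → String) (parent : PySem.Dict String String),
      GoodRho W ρ → UFInv W ρ parent →
      (∀ g ∈ gl, g ≠ [] ∧ ∀ x ∈ g, x ∈ W) →
      UFInv W (gl.foldl mergeG ρ) (aUnionLoop fuel gl parent) ∧
        GoodRho W (gl.foldl mergeG ρ) := by
  intro gl
  induction gl with
  | nil => intro ρ parent hG hI _; exact ⟨by simpa [aUnionLoop] using hI, hG⟩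
  | cons g gl ih =>
    intro ρ parent hG hI hgl
    obtain ⟨hne, hsub⟩ := hgl g List.mem_cons_self
    have hgl' : ∀ g' ∈ gl, g' ≠ [] ∧ ∀ x ∈ g', x ∈ W := fun g' hg' => hgl g' (by simp [hg'])
    cases g with
    | nil => exact absurd rfl hne
    | cons anchor rest =>
      have hGg : GoodRho W (mergeG ρ (anchor :: rest)) :=
        GoodRho_mergeG W ρ _ hG hsub (by simp)
      by_cases hlen : (anchor :: rest).length < 2
      · have hrest : rest = [] := by
          simp only [List.length_cons] at hlen
          exact List.eq_nil_of_length_eq_zero (by omega)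
        subst hrest
        have hstep : aUnionLoop fuel ([anchor] :: gl) parent = aUnionLoop fuel gl parent := by
          simp [aUnionLoop]
        rw [List.foldl_cons, mergeG_singleton, hstep]
        exact ih ρ parent hG hI hgl'
      · have hstep : aUnionLoop fuel ((anchor :: rest) :: gl) parent
            = aUnionLoop fuel gl (rest.foldl (fun pd w => ufUnion fuel pd anchor w) parent) := by
          simp only [aUnionLoop, List.foldl_cons]
          rw [if_neg hlen]
        have h1 := aRest_spec W ρ fuel anchor hfuel hG rest [] parent
          (by rw [mergeG_singleton]; exact hI) (by simpa using hsub)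
        rw [List.foldl_cons, hstep]
        exact ih (mergeG ρ (anchor :: rest))
          (rest.foldl (fun pd w => ufUnion fuel pd anchor w) parent) hGg
          (by simpa using h1) hgl'

def MInv (W : List String) (ρ : String → String)
    (members : PySem.Dict String (List String)) : Prop :=
  ∀ r ∈ W, ρ r = r → (members.getD r []).Perm (W.filter (fun w => decide (ρ w = r)))

lemma filter_or_perm {α : Type} (l : List α) (p q : α → Bool)
    (h : ∀ x, ¬(p x = true ∧ q x = true)) :
    (l.filter (fun x => p x || q x)).Perm (l.filter p ++ l.filter q) := by
  induction l with
  | nil => simp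
  | cons x t ih =>
    by_cases hp : p x = true
    · have hq : ¬ q x = true := fun hq => h x ⟨hp, hq⟩
      simp only [List.filter_cons, hp, hq, Bool.true_or, if_true, Bool.false_eq_true, if_false,
        List.cons_append]
      exact ih.cons x
    · by_cases hq : q x = true
      · simp only [List.filter_cons, hp, hq, Bool.or_true, Bool.false_eq_true, if_false, if_true]
        exact (ih.cons x).trans List.perm_middle.symm
      · simp only [List.filter_cons, hp, hq, Bool.or_self, Bool.false_eq_true, if_false]
        exact ih

lemma bStep_spec (W : List String) (ρc : String → String)
    (rep : PySem.Dict String String) (members : PySem.Dict String (List String))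
    (r target : String)
    (hR : ∀ w ∈ W, rep.getD w w = ρc w) (hM : MInv W ρc members)
    (hrW : r ∈ W) (hrfix : ρc r = r) (htW : target ∈ W) (htfix : ρc target = target)
    (hrt : r ≠ target) :
    (∀ w ∈ W, ((members.getD r []).foldl (fun rp x => rp.insert x target) rep).getD w w
       = (if ρc w = r then target else ρc w))
    ∧ MInv W (fun w => if ρc w = r then target else ρc w)
        (members.insert target (members.getD target [] ++ members.getD r [])) := by
  have hblk := hM r hrW hrfix
  have hblkmem : ∀ w, w ∈ members.getD r [] ↔ (w ∈ W ∧ ρc w = r) := by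
    intro w
    rw [hblk.mem_iff, List.mem_filter]
    simp
  constructor
  · intro w hw
    rw [getD_foldl_insert_fun (members.getD r []) (fun _ => target) rep w w]
    by_cases hc : ρc w = r
    · rw [if_pos ((hblkmem w).mpr ⟨hw, hc⟩), if_pos hc]
    · rw [if_neg (fun hmem => hc ((hblkmem w).mp hmem).2), if_neg hc]
      exact hR w hw
  · intro r' hr'W hfix'
    have hfix2 : (if ρc r' = r then target else ρc r') = r' := hfix'
    by_cases hr't : r' = target
    · rw [hr't, PySem.Dict.getD_insert_self]
      show (members.getD target [] ++ members.getD r []).Perm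
        (W.filter (fun w => decide ((if ρc w = r then target else ρc w) = target)))
      have htgt := hM target htW htfix
      have hperm2 : (members.getD target [] ++ members.getD r []).Perm
          (W.filter (fun w => decide (ρc w = target)) ++ W.filter (fun w => decide (ρc w = r))) :=
        htgt.append hblk
      have hfp := filter_or_perm W (fun w => decide (ρc w = target)) (fun w => decide (ρc w = r))
        (by
          intro x hx
          rw [decide_eq_true_eq, decide_eq_true_eq] at hx
          exact hrt (hx.2.symm.trans hx.1))
      have hfeq : W.filter (fun w => decide ((if ρc w = r then target else ρc w) = target))
          = W.filter (fun w => decide (ρc w = target) || decide (ρc w = r)) := by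
        apply List.filter_congr
        intro w _
        by_cases hc : ρc w = r
        · simp [hc]
        · simp [hc]
      rw [hfeq]
      exact hperm2.symm.symm.trans hfp.symm
    · rw [PySem.Dict.getD_insert_of_ne _ _ _ hr't]
      have hfix : ρc r' = r' := by
        by_cases hc : ρc r' = r
        · rw [if_pos hc] at hfix2; exact absurd hfix2.symm hr't
        · rwa [if_neg hc] at hfix2
      have hr'r : r' ≠ r := by
        intro h
        rw [if_pos (h ▸ hfix)] at hfix2
        exact hr't hfix2.symm
      show (members.getD r' []).Perm
        (W.filter (fun w => decide ((if ρc w = r then target else ρc w) = r')))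
      have hne1 : ¬ (target = r') := fun h => hr't h.symm
      have hne2 : ¬ ((r : String) = r') := fun h => hr'r h.symm
      have hfeq2 : W.filter (fun w => decide ((if ρc w = r then target else ρc w) = r'))
          = W.filter (fun w => decide (ρc w = r')) := by
        apply List.filter_congr
        intro w _
        by_cases hc : ρc w = r
        · simp [hc, hne1, hne2]
        · simp [hc]
      rw [hfeq2]
      exact hM r' hr'W hfix

lemma bRoots_spec (W : List String) (target : String) :
    ∀ (rl : List String) (ρc σ : String → String)
      (rep : PySem.Dict String String) (members : PySem.Dict String (List String)),
      rl.Nodup →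
      (∀ w ∈ W, rep.getD w w = ρc w) → MInv W ρc members →
      (∀ r ∈ rl, r ∈ W ∧ ρc r = r) → target ∈ W → ρc target = target →
      (∀ w, σ w = if ρc w ∈ rl ∧ ρc w ≠ target then target else ρc w) →
      (∀ w ∈ W, (rl.foldl (fun st r =>
          if r ≠ target then
            (((st.2.getD r []).foldl (fun rp x => rp.insert x target) st.1),
             st.2.insert target (st.2.getD target [] ++ st.2.getD r []))
          else st) (rep, members)).1.getD w w = σ w)
      ∧ MInv W σ ((rl.foldl (fun st r =>
          if r ≠ target then
            (((st.2.getD r []).foldl (fun rp x => rp.insert x target) st.1),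
             st.2.insert target (st.2.getD target [] ++ st.2.getD r []))
          else st) (rep, members)).2) := by
  intro rl
  induction rl with
  | nil =>
    intro ρc σ rep members _ hR hM _ _ _ hσ
    have hσeq : σ = ρc := funext fun w => by rw [hσ]; simp
    rw [hσeq]
    exact ⟨hR, hM⟩
  | cons r rl ih =>
    intro ρc σ rep members hnd hR hM hrl htW htfix hσ
    obtain ⟨hrrl, hndrl⟩ := List.nodup_cons.mp hnd
    obtain ⟨hrW, hrfix⟩ := hrl r List.mem_cons_self
    by_cases hrt : r = target
    · rw [List.foldl_cons, if_neg (fun h => h hrt)]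
      apply ih ρc σ rep members hndrl hR hM
        (fun r' hr' => hrl r' (by simp [hr'])) htW htfix
      intro w
      rw [hσ w]
      by_cases hc : ρc w ∈ rl ∧ ρc w ≠ target
      · rw [if_pos ⟨by simp [hc.1], hc.2⟩, if_pos hc]
      · rw [if_neg hc, if_neg (by
          intro ⟨h1, h2⟩
          rcases List.mem_cons.mp h1 with h1 | h1
          · exact h2 (h1.trans hrt)
          · exact hc ⟨h1, h2⟩)]
    · rw [List.foldl_cons, if_pos hrt]
      obtain ⟨hR', hM'⟩ := bStep_spec W ρc rep members r target hR hM hrW hrfix htW htfix hrt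
      apply ih (fun w => if ρc w = r then target else ρc w) σ _ _ hndrl hR' hM'
      · intro r' hr'
        obtain ⟨hr'W, hr'fix⟩ := hrl r' (by simp [hr'])
        refine ⟨hr'W, ?_⟩
        have hr'r : ρc r' ≠ r := fun h => hrrl ((hr'fix ▸ h : r' = r) ▸ hr')
        rw [if_neg hr'r]
        exact hr'fix
      · exact htW
      · show (if ρc target = r then target else ρc target) = target
        rw [if_neg (fun h => hrt ((htfix ▸ h : target = r)).symm), htfix]
      · intro w
        rw [hσ w]
        by_cases hc : ρc w = r
        · rw [if_pos ⟨by simp [hc], hc ▸ hrt⟩]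
          have h1 : (if ρc w = r then target else ρc w) = target := if_pos hc
          rw [if_neg (fun h => h.2 h1), h1]
        · have h1 : (if ρc w = r then target else ρc w) = ρc w := if_neg hc
          rw [h1]
          by_cases h2 : ρc w ∈ rl ∧ ρc w ≠ target
          · rw [if_pos ⟨by simp [h2.1], h2.2⟩, if_pos h2]
          · rw [if_neg (by
              intro ⟨ha, hb⟩
              rcases List.mem_cons.mp ha with ha | ha
              · exact hc ha
              · exact h2 ⟨ha, hb⟩), if_neg h2]

lemma bMerge_spec (W : List String) (ρ : String → String)
    (rep : PySem.Dict String String) (members : PySem.Dict String (List String))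
    (g : List String) (hG : GoodRho W ρ)
    (hrep : ∀ w ∈ W, rep.getD w w = ρ w) (hM : MInv W ρ members)
    (hsub : ∀ x ∈ g, x ∈ W) (hne : g ≠ []) :
    (∀ w ∈ W, (bMerge (rep, members) g).1.getD w w = mergeG ρ g w)
    ∧ MInv W (mergeG ρ g) (bMerge (rep, members) g).2 := by
  have hmap : g.map (fun w => rep.getD w w) = g.map ρ :=
    List.map_congr_left (fun x hx => hrep x (hsub x hx))
  have hne' : g.map ρ ≠ [] := by simpa using hne
  have hMmem : Mof (g.map ρ) ∈ g.map ρ := Mof_mem _ hne'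
  have htarget : (PySem.List.min? (PySem.Set.ofList (g.map ρ)) (fun r => r)).getD ""
      = Mof (g.map ρ) := by
    cases hroots : PySem.Set.ofList (g.map ρ) with
    | nil =>
      exfalso
      have := (PySem.Set.mem_ofList (g.map ρ) (Mof (g.map ρ))).mpr hMmem
      rw [hroots] at this
      exact absurd this (List.not_mem_nil)
    | cons r srest =>
      rw [PySem.List.min?_id_cons, Option.getD_some]
      have : Mof (r :: srest) = Mof (g.map ρ) := by
        apply Mof_congr
        · intro x; rw [← hroots]; exact PySem.Set.mem_ofList _ x
        · simp
      simpa [Mof] using this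
  have hb : bMerge (rep, members) g
      = (PySem.Set.ofList (g.map ρ)).foldl (fun st r =>
          if r ≠ Mof (g.map ρ) then
            (((st.2.getD r []).foldl (fun rp x => rp.insert x (Mof (g.map ρ))) st.1),
             st.2.insert (Mof (g.map ρ)) (st.2.getD (Mof (g.map ρ)) [] ++ st.2.getD r []))
          else st) (rep, members) := by
    show (PySem.Set.ofList (g.map (fun w => rep.getD w w))).foldl _ (rep, members) = _
    rw [hmap, htarget]
  have hmof : ∀ x ∈ g.map ρ, x ∈ W ∧ ρ x = x := by
    intro x hx
    rcases List.mem_map.mp hx with ⟨y, hy, rfl⟩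
    exact ⟨(hG y (hsub y hy)).1, (hG y (hsub y hy)).2.2⟩
  have hres := bRoots_spec W (Mof (g.map ρ)) (PySem.Set.ofList (g.map ρ)) ρ (mergeG ρ g)
    rep members (PySem.Set.nodup_ofList _) hrep hM
    (fun r hr => hmof r ((PySem.Set.mem_ofList _ r).mp hr))
    (hmof _ hMmem).1 (hmof _ hMmem).2
    (by
      intro w
      show (if ρ w ∈ g.map ρ then Mof (g.map ρ) else ρ w) = _
      by_cases hin : ρ w ∈ g.map ρ
      · rw [if_pos hin]
        by_cases hM2 : ρ w = Mof (g.map ρ)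
        · rw [if_neg (fun h => h.2 hM2), hM2]
        · rw [if_pos ⟨(PySem.Set.mem_ofList _ _).mpr hin, hM2⟩]
      · rw [if_neg hin, if_neg (by
          intro ⟨h1, _⟩
          exact hin ((PySem.Set.mem_ofList _ _).mp h1))])
  rw [hb]
  exact hres

lemma bMergeLoop_spec (W : List String) :
    ∀ (gl : List (List String)) (ρ : String → String)
      (rep : PySem.Dict String String) (members : PySem.Dict String (List String)),
      GoodRho W ρ →
      (∀ w ∈ W, rep.getD w w = ρ w) → MInv W ρ members →
      (∀ g ∈ gl, g ≠ [] ∧ ∀ x ∈ g, x ∈ W) →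
      ∀ w ∈ W, (gl.foldl bMerge (rep, members)).1.getD w w = gl.foldl mergeG ρ w := by
  intro gl
  induction gl with
  | nil => intro ρ rep members _ hrep _ _ w hw; exact hrep w hw
  | cons g gl ih =>
    intro ρ rep members hG hrep hM hgl
    obtain ⟨hne, hsub⟩ := hgl g List.mem_cons_self
    obtain ⟨hR', hM'⟩ := bMerge_spec W ρ rep members g hG hrep hM hsub hne
    simp only [List.foldl_cons]
    have hGg : GoodRho W (mergeG ρ g) := GoodRho_mergeG W ρ g hG hsub hne
    have := ih (mergeG ρ g) (bMerge (rep, members) g).1 (bMerge (rep, members) g).2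
      hGg hR' hM' (fun g' hg' => hgl g' (by simp [hg']))
    simpa using this

-- values of the groups dict: nonempty lists of wallets
def GroupsOK (W : List String) (d : PySem.Dict String (List String)) : Prop :=
  ∀ v ∈ d.values, v ≠ [] ∧ ∀ x ∈ v, x ∈ W

lemma GroupsOK_modify (W : List String) (d : PySem.Dict String (List String)) (k w : String)
    (h : GroupsOK W d) (hw : w ∈ W) :
    GroupsOK W (d.modify k [] (fun ws => ws ++ [w])) := by
  have hmod : d.modify k [] (fun ws => ws ++ [w]) = d.insert k (d.getD k [] ++ [w]) := rfl
  rw [hmod]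
  intro v hv
  rcases PySem.Dict.mem_values_insert _ _ _ _ hv with rfl | hv'
  · refine ⟨by simp, ?_⟩
    intro x hx
    rcases List.mem_append.mp hx with hx | hx
    · rcases hget : d.get? k with _ | u
      · rw [PySem.Dict.getD_eq_get?_getD, hget] at hx; simp at hx
      · rw [PySem.Dict.getD_eq_get?_getD, hget] at hx
        have hu : u ∈ d.values :=
          List.mem_map.mpr ⟨(k, u), PySem.Dict.mem_items_of_get?_eq_some d hget, rfl⟩
        exact (h u hu).2 x hx
    · rw [List.mem_singleton.mp hx]; exact hw
  · exact h v hv'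

lemma GroupsOK_bGroups (W : List String) (d : PySem.Dict String (List String)) :
    ∀ (l : List String) (g : PySem.Dict String (List String)), (∀ x ∈ l, x ∈ W) → GroupsOK W g →
      GroupsOK W (l.foldl
        (fun g w => (d.getD w []).foldl (fun g k => g.modify k [] (fun ws => ws ++ [w])) g) g) := by
  have hinner : ∀ (w : String), w ∈ W → ∀ (ks : List String) (g : PySem.Dict String (List String)),
      GroupsOK W g → GroupsOK W (ks.foldl (fun g k => g.modify k [] (fun ws => ws ++ [w])) g) := by
    intro w hw ks
    induction ks with
    | nil => intro g hg; exact hg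
    | cons k ks ih =>
      intro g hg
      exact ih _ (GroupsOK_modify W g k w hg hw)
  intro l
  induction l with
  | nil => intro g _ hg; exact hg
  | cons x t ih =>
    intro g hl hg
    exact ih _ (fun y hy => hl y (by simp [hy]))
      (hinner x (hl x List.mem_cons_self) _ g hg)

lemma aGroups_eq_bGroups (d : PySem.Dict String (List String)) (hnd : d.keys.Nodup) :
    aGroups d = bGroups d (PySem.List.sorted d.keys (fun w => w) false) := by
  have hperm := PySem.List.sorted_perm d.keys (fun w => w) false
  have hndW : (PySem.List.sorted d.keys (fun w => w) false).Nodup := hperm.nodup_iff.mpr hnd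
  have hple : (PySem.List.sorted d.keys (fun w => w) false).Pairwise (· ≤ ·) :=
    PySem.List.sorted_pairwise d.keys (fun w => w)
  have hplt : (PySem.List.sorted d.keys (fun w => w) false).Pairwise (· < ·) :=
    (hple.and hndW).imp (fun h => lt_of_le_of_ne h.1 h.2)
  have hsi : PySem.List.sorted d.items (fun p => p.1) false
      = (PySem.List.sorted d.keys (fun w => w) false).map (fun w => (w, d.getD w [])) := by
    apply PySem.List.sorted_eq_of_perm_of_pairwise_lt
    · rw [PySem.Dict.items_eq_map_keys d hnd []]
      exact hperm.map _
    · exact List.pairwise_map.mpr hplt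
  unfold aGroups bGroups
  rw [hsi, List.foldl_map]

lemma aRootLoop_snd (W : List String) (ρ : String → String) (fuel : Nat)
    (hfuel : W.length < fuel) (hG : GoodRho W ρ) :
    ∀ (l : List String), (∀ x ∈ l, x ∈ W) →
      ∀ (parent : PySem.Dict String String) (b : PySem.Dict String (List String)),
      UFInv W ρ parent →
      (l.foldl (fun st w =>
          let f := ufFind fuel st.1 w
          (f.1, st.2.modify f.2 [] (fun ws => ws ++ [w]))) (parent, b)).2
        = l.foldl (fun b w => b.modify (ρ w) [] (fun ws => ws ++ [w])) b := by
  intro l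
  induction l with
  | nil => intro _ parent b _; rfl
  | cons w t ih =>
    intro hsub parent b hI
    have hw : w ∈ W := hsub w List.mem_cons_self
    obtain ⟨hv, hI'⟩ := ufFind_spec W ρ hG fuel parent w hI hw
      (lt_of_le_of_lt (List.length_filter_le _ _) hfuel)
    simp only [List.foldl_cons]
    rw [ih (fun x hx => hsub x (by simp [hx])) _ _ hI', hv]

lemma blocks_getD (W : List String) (ρ : String → String) (r : String) :
    (W.foldl (fun b w => b.modify (ρ w) [] (fun ws => ws ++ [w])) PySem.Dict.empty).getD r []
      = W.filter (fun w => ρ w == r) := by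
  have hmap : W.foldl (fun b w => b.modify (ρ w) [] (fun ws => ws ++ [w])) PySem.Dict.empty
      = (W.map (fun w => (ρ w, w))).foldl
          (fun b p => b.modify p.1 [] (fun ws => ws ++ [p.2])) PySem.Dict.empty := by
    rw [List.foldl_map]
  rw [hmap, PySem.Dict.getD_foldl_modify_append, List.filter_map, List.map_map]
  have h0 : (PySem.Dict.empty : PySem.Dict String (List String)).getD r [] = [] := rfl
  rw [h0, List.nil_append]
  have hcomp : ((fun (x : String × String) => x.2) ∘ fun w => (ρ w, w)) = fun w => w := rfl
  rw [hcomp, List.map_id']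
  rfl

lemma aFinal_eq_bFinal (W : List String) (ρ : String → String) (hplt : W.Pairwise (· < ·)) :
    aFinal (W.foldl (fun b w => b.modify (ρ w) [] (fun ws => ws ++ [w])) PySem.Dict.empty)
      = bFinal (W.foldl (fun b w => b.modify (ρ w) [] (fun ws => ws ++ [w])) PySem.Dict.empty) := by
  have hws : ∀ r : String,
      PySem.List.sorted
        ((W.foldl (fun b w => b.modify (ρ w) [] (fun ws => ws ++ [w])) PySem.Dict.empty).getD r [])
        (fun w => w) false
      = (W.foldl (fun b w => b.modify (ρ w) [] (fun ws => ws ++ [w])) PySem.Dict.empty).getD r [] := by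
    intro r
    apply PySem.List.sorted_eq_self_of_pairwise
    rw [blocks_getD]
    exact ((hplt.sublist List.filter_sublist).imp le_of_lt)
  unfold aFinal bFinal
  refine congrArg Prod.fst (PySem.List.foldl_congr_mem _ _ _ _ ?_)
  intro acc r _
  rw [hws]

-- ===== VERDICT (by name: the statement is the Claim_ definition above) =====
theorem assign_wallet_cluster_ids_spec : Claim_equal_assign_wallet_cluster_ids := by
  intro inp _
  unfold Spec_assign_wallet_cluster_ids
  by_cases hemp : inp.isEmpty = true
  · have hnil : inp = [] := List.isEmpty_iff.mp hemp
    subst hnil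
    rfl
  · simp only [assign_wallet_cluster_ids, assign_wallet_cluster_ids_alt, if_neg hemp]
    set d := PySem.Dict.ofList inp with hd
    set W := PySem.List.sorted d.keys (fun w => w) false with hWd
    have hndk : d.keys.Nodup := PySem.Dict.nodup_keys_ofList inp
    have hperm : W.Perm d.keys := PySem.List.sorted_perm d.keys (fun w => w) false
    have hnd : W.Nodup := hperm.nodup_iff.mpr hndk
    have hple : W.Pairwise (· ≤ ·) := PySem.List.sorted_pairwise d.keys (fun w => w)
    have hplt : W.Pairwise (· < ·) := (hple.and hnd).imp (fun h => lt_of_le_of_ne h.1 h.2)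
    have hfuel : W.length < W.length + 1 := Nat.lt_succ_self _
    have hgrp : aGroups d = bGroups d W := aGroups_eq_bGroups d hndk
    have hGO : GroupsOK W (bGroups d W) := by
      have hempty : GroupsOK W (PySem.Dict.empty : PySem.Dict String (List String)) := by
        intro v hv
        have hval : (PySem.Dict.empty : PySem.Dict String (List String)).values = [] := rfl
        rw [hval] at hv
        exact absurd hv (List.not_mem_nil)
      unfold bGroups
      exact GroupsOK_bGroups W d W PySem.Dict.empty (fun x hx => hx) hempty
    have hpar0 : UFInv W (fun w => w) (W.foldl (fun pd w => pd.insert w w) PySem.Dict.empty) := by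
      intro w hw
      rw [getD_foldl_insert_fun W (fun x => x), if_pos hw]
      exact ⟨hw, le_refl w, rfl, Iff.rfl⟩
    have hGid : GoodRho W (fun w => w) := fun w hw => ⟨hw, le_refl w, rfl⟩
    obtain ⟨hUF, hGf⟩ := aUnionLoop_spec W (W.length + 1) hfuel (bGroups d W).values
      (fun w => w) (W.foldl (fun pd w => pd.insert w w) PySem.Dict.empty) hGid hpar0 hGO
    have hrep0 : ∀ w ∈ W, (W.foldl (fun r w => r.insert w w) PySem.Dict.empty).getD w w = w := by
      intro w hw
      rw [getD_foldl_insert_fun W (fun x => x), if_pos hw]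
    have hmem0 : MInv W (fun w => w) (W.foldl (fun m w => m.insert w [w]) PySem.Dict.empty) := by
      intro r hr _
      rw [getD_foldl_insert_fun W (fun w => [w]), if_pos hr]
      have h1 : W.filter (fun w => decide ((fun w : String => w) w = r)) = W.filter (· == r) := by
        apply List.filter_congr
        intro w _
        show decide (w = r) = (w == r)
        by_cases h : w = r <;> simp [h]
      have h2 : W.filter (fun w => decide ((fun w : String => w) w = r)) = [r] := by
        rw [h1, List.filter_beq, List.count_eq_one_of_mem hnd hr, List.replicate_one]
      rw [h2]
    have hrep : ∀ w ∈ W,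
        ((bGroups d W).values.foldl bMerge
          (W.foldl (fun r w => r.insert w w) PySem.Dict.empty,
           W.foldl (fun m w => m.insert w [w]) PySem.Dict.empty)).1.getD w w
        = ((bGroups d W).values.foldl mergeG (fun w => w)) w :=
      bMergeLoop_spec W (bGroups d W).values (fun w => w)
        (W.foldl (fun r w => r.insert w w) PySem.Dict.empty)
        (W.foldl (fun m w => m.insert w [w]) PySem.Dict.empty) hGid hrep0 hmem0 hGO
    rw [hgrp]
    have hrtw : (aRootLoop (W.length + 1) W (aUnionLoop (W.length + 1) (bGroups d W).values
        (W.foldl (fun pd w => pd.insert w w) PySem.Dict.empty))).2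
        = W.foldl (fun b w =>
            b.modify (((bGroups d W).values.foldl mergeG (fun w => w)) w) []
              (fun ws => ws ++ [w])) PySem.Dict.empty := by
      unfold aRootLoop
      exact aRootLoop_snd W ((bGroups d W).values.foldl mergeG (fun w => w)) (W.length + 1)
        hfuel hGf W (fun x hx => hx) _ PySem.Dict.empty hUF
    have hblk : bBlocks W ((bGroups d W).values.foldl bMerge
        (W.foldl (fun r w => r.insert w w) PySem.Dict.empty,
         W.foldl (fun m w => m.insert w [w]) PySem.Dict.empty)).1
        = W.foldl (fun b w =>
            b.modify (((bGroups d W).values.foldl mergeG (fun w => w)) w) []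
              (fun ws => ws ++ [w])) PySem.Dict.empty := by
      unfold bBlocks
      apply PySem.List.foldl_congr_mem
      intro acc w hw
      rw [hrep w hw]
    rw [hrtw, hblk, aFinal_eq_bFinal W (((bGroups d W).values.foldl mergeG (fun w => w))) hplt]
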